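-- pv_equiv track=rewrite | github.com/KathTheDragon/Conlanger | core.py | parse_word
-- ===== SOURCE A (Python) =====
-- def parse_word(word, graphs=None):
--     '''Parse a string of graphemes.
--
--     Arguments:
--         word   -- the word to be parsed (str)
--         graphs -- category of graphemes (Cat)
--
--     Returns a list.
--     '''
--     # Black magic
--     # While test isn't a single character and doesn't begin any polygraph
--     #     From i=len(test) to i=1
--     #         Does test begin with a valid graph? Single characters are always valid
--     #             Add this valid graph to the output
--     #             Remove the graph from test, and remove leading instances of separator
--     test = ''
--     if graphs is None:
--         return list(word)
--     separator = graphs[0]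
--     polygraphs = [graph for graph in graphs if len(graph) > 1]
--     graphemes = []
--     for char in '#'.join(f'.{word}.'.split()).strip('.')+separator:  # Convert all whitespace to a single #
--         test += char
--         while len(test) > 1 and not any(graph.startswith(test) for graph in polygraphs):
--             for i in reversed(range(1, len(test)+1)):
--                 if i == 1 or test[:i] in polygraphs:
--                     graphemes.append(test[:i])
--                     test = test[i:].lstrip(separator)
--                     break
--     return graphemes
-- ===== SOURCE B (Python) =====
-- def parse_word(word, graphs=None):
--     '''Parse a string of graphemes (position-scan re-implementation).'''
--     if graphs is None:
--         return list(word)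
--     separator = graphs[0]
--     polygraphs = {graph for graph in graphs if len(graph) > 1}
--     # every proper-or-full prefix of a polygraph, for O(1) viability tests
--     prefixes = {graph[:l] for graph in polygraphs for l in range(1, len(graph) + 1)}
--     s = '#'.join(f'.{word}.'.split()).strip('.') + separator
--     n = len(s)
--     graphemes = []
--     i = k = 0
--     while True:
--         # advance the lookahead k until the window s[i:k] can no longer grow
--         while k <= n and (k - i < 2 or s[i:k] in prefixes):
--             k += 1
--         if k > n:
--             return graphemes
--         # longest valid grapheme at i (never the whole window)
--         j = k - i - 1
--         while j > 1 and s[i:i+j] not in polygraphs: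
--             j -= 1
--         graphemes.append(s[i:i+j])
--         i += j
--         # skip separator characters, but only inside the current window
--         while i < k and s[i] in separator:
--             i += 1
-- ===== Notes on version B (the rewrite author's own statement) =====
-- stated objective: alternative
-- what changed: Replaces A's growing-buffer state machine (append each char to a `test` string, then repeatedly emit the longest valid prefix and re-slice the buffer) with a two-index position/lookahead scan over the normalized string that never builds a buffer, using a precomputed set of all polygraph prefixes for O(1) viability tests instead of re-scanning the polygraph list with startswith at every character.
import Mathlib
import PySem

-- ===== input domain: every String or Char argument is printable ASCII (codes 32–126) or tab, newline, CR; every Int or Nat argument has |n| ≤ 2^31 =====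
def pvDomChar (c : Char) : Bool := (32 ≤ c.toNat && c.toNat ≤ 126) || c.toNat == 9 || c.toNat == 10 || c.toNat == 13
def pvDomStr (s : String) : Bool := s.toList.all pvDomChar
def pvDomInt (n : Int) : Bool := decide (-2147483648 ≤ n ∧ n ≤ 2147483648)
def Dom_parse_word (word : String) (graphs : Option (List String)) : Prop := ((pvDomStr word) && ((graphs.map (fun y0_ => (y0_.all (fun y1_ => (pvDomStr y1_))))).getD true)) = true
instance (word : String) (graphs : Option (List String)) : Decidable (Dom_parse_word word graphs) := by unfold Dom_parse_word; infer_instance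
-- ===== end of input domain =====

-- B re-implements the buffer automaton as a two-index (position/lookahead) scan with a
-- precomputed polygraph-prefix set; equivalence of the return values is proved below.
-- (Loops are ported as structural recursion on an explicit bound that provably suffices,
-- a totality guard only — neither port changes algorithm on any input.)

-- shared helper: the normalization line `'#'.join(f'.{word}.'.split()).strip('.') + separator`
-- (identical in A and B), on the List Char side of PySem.
def pvNorm (word : String) (separator : String) : List Char :=
  PySem.Chars.stripChars
    (PySem.Chars.join ['#'] (PySem.Chars.split₀ ('.' :: word.toList ++ ['.']))) ['.']
    ++ separator.toList

-- ===== PORT A =====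
-- `for i in reversed(range(1, len(test)+1)): if i == 1 or test[:i] in polygraphs: … break`
-- as a descending first-hit search (i = 1 always matches, so the search always succeeds;
-- test[:i] on a Nat index is test.take i, cf. PySem.List.slice_natCast).
def pvChooseLen (polygraphs : List (List Char)) (test : List Char) : Nat → Nat
  | 0 => 1
  | m + 1 => if m + 1 = 1 ∨ test.take (m + 1) ∈ polygraphs then m + 1 else pvChooseLen polygraphs test m

-- the inner `while len(test) > 1 and not any(graph.startswith(test) …)` loop of A:
-- emit the chosen prefix, drop it, lstrip the separator characters, repeat.  Each pass
-- shortens `test`, so `test.length` bounds the iteration count (fuel, totality only).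
def pvDrain (polygraphs : List (List Char)) (sepCs : List Char) :
    Nat → List Char → List String → List Char × List String
  | 0, test, out => (test, out)
  | fuel + 1, test, out =>
    if 1 < test.length ∧ (polygraphs.any (fun g => PySem.Chars.startswith g test)) = false then
      let i := pvChooseLen polygraphs test test.length
      -- test[i:].lstrip(separator): drop leading characters belonging to separator (exact)
      pvDrain polygraphs sepCs fuel ((test.drop i).dropWhile (fun c => c ∈ sepCs))
        (out ++ [String.ofList (test.take i)])
    else (test, out)

def parse_word (word : String) (graphs : Option (List String)) : List String :=
  match graphs with
  | none => word.toList.map (fun c => String.ofList [c])   -- list(word)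
  | some gs =>
    match PySem.List.pyGet? gs 0 with
    | none => []   -- graphs[0] raises IndexError (graphs == []): excluded by Pre_parse_word
    | some separator =>
      let polygraphs : List (List Char) := (gs.filter (fun g => 1 < g.toList.length)).map String.toList
      let s := pvNorm word separator
      (s.foldl (fun st c => pvDrain polygraphs separator.toList (st.1 ++ [c]).length (st.1 ++ [c]) st.2)
        (([] : List Char), ([] : List String))).2

-- ===== PORT B =====
-- `while k <= n and (k - i < 2 or s[i:k] in prefixes): k += 1`
-- (k can rise to at most n + 1, so `n + 1 - k` bounds the iteration count)
def pvGrow (prefixes : PySem.Set (List Char)) (s : List Char) (n i : Nat) :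
    Nat → Nat → Nat
  | 0, k => k
  | fuel + 1, k =>
    if k ≤ n ∧ (k - i < 2 ∨ (s.drop i).take (k - i) ∈ prefixes) then
      pvGrow prefixes s n i fuel (k + 1)
    else k

-- `while j > 1 and s[i:i+j] not in polygraphs: j -= 1` (descending first-hit search)
def pvChooseJ (polygraphs : PySem.Set (List Char)) (s : List Char) (i : Nat) : Nat → Nat
  | 0 => 0
  | j + 1 =>
    if 1 < j + 1 ∧ ¬((s.drop i).take (j + 1) ∈ polygraphs) then pvChooseJ polygraphs s i j
    else j + 1

-- `while i < k and s[i] in separator: i += 1`  (i < k ≤ len s, so getD is the exact s[i];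
-- i rises to at most k, so `k - i` bounds the iteration count)
def pvStrip (sepCs : List Char) (s : List Char) (k : Nat) : Nat → Nat → Nat
  | 0, i => i
  | fuel + 1, i => if i < k ∧ s.getD i ' ' ∈ sepCs then pvStrip sepCs s k fuel (i + 1) else i

-- the outer position scan of B (each iteration advances i, so `n + 1` bounds the rounds)
def pvScan (polygraphs prefixes : PySem.Set (List Char)) (sepCs : List Char)
    (s : List Char) (n : Nat) : Nat → Nat → Nat → List String → List String
  | 0, _, _, out => out
  | fuel + 1, i, k, out =>
    let k' := pvGrow prefixes s n i (n + 1 - k) k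
    if n < k' then out
    else
      let j := pvChooseJ polygraphs s i (k' - i - 1)
      let i' := pvStrip sepCs s k' (k' - (i + j)) (i + j)
      pvScan polygraphs prefixes sepCs s n fuel i' k' (out ++ [String.ofList ((s.drop i).take j)])

def parse_word_alt (word : String) (graphs : Option (List String)) : List String :=
  match graphs with
  | none => word.toList.map (fun c => String.ofList [c])   -- list(word)
  | some gs =>
    match PySem.List.pyGet? gs 0 with
    | none => []   -- graphs[0] raises IndexError (graphs == []): excluded by Pre_parse_word
    | some separator =>
      let polyList : List (List Char) := (gs.filter (fun g => 1 < g.toList.length)).map String.toList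
      let polygraphs := PySem.Set.ofList polyList
      -- {graph[:l] for graph in polygraphs for l in range(1, len(graph)+1)} (membership-exact;
      -- the set does not depend on the iteration order of the polygraph set)
      let prefixes := PySem.Set.ofList
        (polyList.flatMap (fun g => (List.range g.length).map (fun l => g.take (l + 1))))
      let s := pvNorm word separator
      pvScan polygraphs prefixes separator.toList s s.length (s.length + 1) 0 0 []

-- ===== PRECONDITION & SPEC =====
-- Pre_ excludes only graphs = Some []: there `graphs[0]` raises IndexError in both programs.
def Pre_parse_word (word : String) (graphs : Option (List String)) : Prop :=
  graphs ≠ some ([] : List String)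
instance (word : String) (graphs : Option (List String)) : Decidable (Pre_parse_word word graphs) := by
  unfold Pre_parse_word; infer_instance

def pvWitness_parse_word : String × Option (List String) := ("ath ab", some ["'", "th", "ab"])

def Spec_parse_word (word : String) (graphs : Option (List String)) (out : List String) : Prop := out = parse_word_alt word graphs
instance (word : String) (graphs : Option (List String)) (out : List String) : Decidable (Spec_parse_word word graphs out) := by unfold Spec_parse_word; infer_instance

-- ===== CLAIM (what is proved, stated in full; the proofs are below) =====
def Claim_equal_parse_word : Prop := ∀ (word : String) (graphs : Option (List String)), Dom_parse_word word graphs → Pre_parse_word word graphs → Spec_parse_word word graphs (parse_word word graphs)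

-- ===== LEMMAS AND PROOFS =====

-- the window s[i:k] as a list
def pvW (s : List Char) (i k : Nat) : List Char := (s.drop i).take (k - i)

-- the list underlying B's prefix set
def pvPrefList (polyList : List (List Char)) : List (List Char) :=
  polyList.flatMap (fun g => (List.range g.length).map (fun l => g.take (l + 1)))

theorem pvChooseLen_pos (p : List (List Char)) (t : List Char) (m : Nat) : 1 ≤ pvChooseLen p t m := by
  induction m with
  | zero => simp [pvChooseLen]
  | succ m ih => unfold pvChooseLen; split <;> omega

theorem pvW_len (s : List Char) (i k : Nat) (hk : k ≤ s.length) :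
    (pvW s i k).length = k - i := by
  simp [pvW]; omega

theorem pvW_append (s : List Char) (i m : Nat) (him : i ≤ m) (hm : m < s.length) :
    pvW s i m ++ [s[m]] = pvW s i (m + 1) := by
  unfold pvW
  have h1 : m + 1 - i = (m - i) + 1 := by omega
  rw [h1, List.take_add_one]
  have h2 : (s.drop i)[m - i]? = some s[m] := by
    rw [List.getElem?_drop]
    have h3 : i + (m - i) = m := by omega
    rw [h3]
    exact List.getElem?_eq_getElem hm
  simp [h2]

theorem pvW_cons (s : List Char) (p k : Nat) (hpk : p < k) (hk : k ≤ s.length) :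
    pvW s p k = s[p]'(by omega) :: pvW s (p + 1) k := by
  unfold pvW
  rw [List.drop_eq_getElem_cons (by omega)]
  have h1 : k - p = (k - (p+1)) + 1 := by omega
  rw [h1, List.take_succ_cons]

theorem pvW_drop (s : List Char) (i k j : Nat) :
    (pvW s i k).drop j = pvW s (i + j) k := by
  unfold pvW
  rw [List.drop_take, List.drop_drop]
  have h1 : k - i - j = k - (i + j) := by omega
  rw [h1]

theorem pvW_take (s : List Char) (i k j : Nat) (hj : j ≤ k - i) :
    (pvW s i k).take j = (s.drop i).take j := by
  unfold pvW
  rw [List.take_take]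
  congr 1
  omega

theorem pvMemPref (polyList : List (List Char)) (t : List Char) :
    t ∈ pvPrefList polyList ↔ (t ≠ [] ∧ ∃ g ∈ polyList, t <+: g) := by
  simp only [pvPrefList, List.mem_flatMap, List.mem_map, List.mem_range]
  constructor
  · rintro ⟨g, hg, l, hl, rfl⟩
    refine ⟨?_, g, hg, List.take_prefix _ _⟩
    have : (g.take (l+1)).length = l + 1 := by simp; omega
    intro hnil; rw [hnil] at this; simp at this
  · rintro ⟨hne, g, hg, hpre⟩
    refine ⟨g, hg, t.length - 1, ?_, ?_⟩
    · have := hpre.length_le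
      have : 1 ≤ t.length := by cases t <;> simp_all
      omega
    · have h1 : t.length - 1 + 1 = t.length := by cases t <;> simp_all
      rw [h1]
      exact (List.prefix_iff_eq_take.mp hpre).symm

theorem pvAnyPrefix (polyList : List (List Char)) (t : List Char) :
    (polyList.any (fun g => PySem.Chars.startswith g t)) = true ↔ ∃ g ∈ polyList, t <+: g := by
  simp [List.any_eq_true, PySem.Chars.startswith_iff]

theorem pvDrain_noop (polyList : List (List Char)) (sepCs : List Char) (fuel : Nat)
    (t : List Char) (out : List String)
    (h : ¬(1 < t.length ∧ (polyList.any (fun g => PySem.Chars.startswith g t)) = false)) :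
    pvDrain polyList sepCs fuel t out = (t, out) := by
  cases fuel with
  | zero => rfl
  | succ fuel => rw [pvDrain, if_neg h]

theorem pvDrain_dec (polygraphs : List (List Char)) (sepCs test : List Char) (h : 1 < test.length) :
    ((test.drop (pvChooseLen polygraphs test test.length)).dropWhile (fun c => c ∈ sepCs)).length
      < test.length := by
  have h1 := pvChooseLen_pos polygraphs test test.length
  have h2 : (test.drop (pvChooseLen polygraphs test test.length)).length ≤ test.length - pvChooseLen polygraphs test test.length := by
    simp [List.length_drop]
  have h3 := List.length_dropWhile_le (p := fun c => decide (c ∈ sepCs)) (l := test.drop (pvChooseLen polygraphs test test.length))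
  omega

-- the fuel bound is inert: any two sufficient bounds give the same run
theorem pvDrain_irrel (polyList : List (List Char)) (sepCs : List Char) (f1 f2 : Nat) :
    ∀ (t : List Char) (out : List String), t.length ≤ f1 → t.length ≤ f2 →
    pvDrain polyList sepCs f1 t out = pvDrain polyList sepCs f2 t out := by
  induction f1 generalizing f2 with
  | zero =>
    intro t out h1 h2
    have ht : ¬(1 < t.length ∧ (polyList.any (fun g => PySem.Chars.startswith g t)) = false) := by
      intro hc; omega
    rw [pvDrain_noop _ _ _ _ _ ht, pvDrain_noop _ _ _ _ _ ht]
  | succ f1 ih =>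
    intro t out h1 h2
    by_cases hc : 1 < t.length ∧ (polyList.any (fun g => PySem.Chars.startswith g t)) = false
    · obtain ⟨g2, hg2⟩ : ∃ g2, f2 = g2 + 1 := ⟨f2 - 1, by omega⟩
      subst hg2
      rw [pvDrain, pvDrain, if_pos hc, if_pos hc]
      have hdec := pvDrain_dec polyList sepCs t hc.1
      exact ih _ _ _ (by omega) (by omega)
    · rw [pvDrain_noop _ _ _ _ _ hc, pvDrain_noop _ _ _ _ _ hc]

theorem pvDrain_fire (polyList : List (List Char)) (sepCs : List Char) (fuel : Nat)
    (t : List Char) (out : List String) (hf : t.length ≤ fuel + 1)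
    (h : 1 < t.length ∧ (polyList.any (fun g => PySem.Chars.startswith g t)) = false) :
    pvDrain polyList sepCs (fuel + 1) t out
      = pvDrain polyList sepCs
          ((t.drop (pvChooseLen polyList t t.length)).dropWhile (fun c => c ∈ sepCs)).length
          ((t.drop (pvChooseLen polyList t t.length)).dropWhile (fun c => c ∈ sepCs))
          (out ++ [String.ofList (t.take (pvChooseLen polyList t t.length))]) := by
  rw [pvDrain, if_pos h]
  have hdec := pvDrain_dec polyList sepCs t h.1
  exact pvDrain_irrel polyList sepCs fuel _ _ _ (by omega) (le_refl _)

theorem pvGrow_ge (p : PySem.Set (List Char)) (s : List Char) (n i : Nat) (fuel : Nat) :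
    ∀ k, k ≤ pvGrow p s n i fuel k := by
  induction fuel with
  | zero => intro k; simp [pvGrow]
  | succ fuel ih =>
    intro k
    rw [pvGrow]
    split
    · have := ih (k + 1); omega
    · omega

theorem pvGrow_below (p : PySem.Set (List Char)) (s : List Char) (n i : Nat) (fuel : Nat) :
    ∀ k l, k ≤ l → l < pvGrow p s n i fuel k →
    l ≤ n ∧ (l - i < 2 ∨ (s.drop i).take (l - i) ∈ p) := by
  induction fuel with
  | zero => intro k l h1 h2; rw [pvGrow] at h2; omega
  | succ fuel ih =>
    intro k l h1 h2
    rw [pvGrow] at h2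
    split at h2
    · rename_i h
      rcases Nat.eq_or_lt_of_le h1 with he | hlt
      · subst he; exact h
      · exact ih (k + 1) l (by omega) h2
    · omega

theorem pvGrow_exit (p : PySem.Set (List Char)) (s : List Char) (n i : Nat) (fuel : Nat) :
    ∀ k, n + 1 - k ≤ fuel →
    ¬(pvGrow p s n i fuel k ≤ n ∧ (pvGrow p s n i fuel k - i < 2 ∨
        (s.drop i).take (pvGrow p s n i fuel k - i) ∈ p)) := by
  induction fuel with
  | zero =>
    intro k hk
    rw [pvGrow]
    intro hc
    omega
  | succ fuel ih =>
    intro k hk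
    rw [pvGrow]
    split
    · rename_i h
      exact ih (k + 1) (by omega)
    · assumption

theorem pvChooseJ_bounds (p : PySem.Set (List Char)) (s : List Char) (i j : Nat) (hj : 1 ≤ j) :
    1 ≤ pvChooseJ p s i j ∧ pvChooseJ p s i j ≤ j := by
  induction j with
  | zero => omega
  | succ j ih =>
    rw [pvChooseJ]
    split
    · rename_i h
      have := ih (by omega)
      omega
    · omega

theorem pvStrip_bounds (c : List Char) (s : List Char) (k : Nat) (fuel : Nat) :
    ∀ i, i ≤ k → i ≤ pvStrip c s k fuel i ∧ pvStrip c s k fuel i ≤ k := by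
  induction fuel with
  | zero => intro i hik; simp [pvStrip]; omega
  | succ fuel ih =>
    intro i hik
    rw [pvStrip]
    split
    · rename_i h
      have := ih (i + 1) (by omega)
      omega
    · omega

theorem pvStripEq (sepCs : List Char) (s : List Char) (k : Nat) (fuel : Nat) :
    ∀ p, p ≤ k → k ≤ s.length → k - p ≤ fuel →
    (pvW s p k).dropWhile (fun c => c ∈ sepCs) = pvW s (pvStrip sepCs s k fuel p) k := by
  induction fuel with
  | zero =>
    intro p hpk hk hf
    have hpe : k - p = 0 := by omega
    rw [pvStrip]
    simp [pvW, hpe]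
  | succ fuel ih =>
    intro p hpk hk hf
    rw [pvStrip]
    split
    · rename_i h
      have hpl : p < s.length := by omega
      rw [pvW_cons s p k h.1 hk, List.dropWhile_cons]
      have hgd : s.getD p ' ' = s[p] := List.getD_eq_getElem s ' ' hpl
      rw [hgd] at h
      rw [if_pos (by simpa using h.2)]
      exact ih (p + 1) (by omega) hk (by omega)
    · rename_i h
      by_cases hpk2 : p < k
      · have hns : s.getD p ' ' ∉ sepCs := fun hc => h ⟨hpk2, hc⟩
        have hpl : p < s.length := by omega
        rw [List.getD_eq_getElem s ' ' hpl] at hns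
        rw [pvW_cons s p k hpk2 hk, List.dropWhile_cons, if_neg (by simpa using hns)]
      · have hpe : k - p = 0 := by omega
        simp [pvW, hpe]

theorem pvChooseEq (polyList : List (List Char)) (s : List Char) (i : Nat) (t : List Char)
    (m : Nat) (hm : 1 ≤ m)
    (htake : ∀ j, j ≤ m → (s.drop i).take j = t.take j) :
    pvChooseLen polyList t m = pvChooseJ (PySem.Set.ofList polyList) s i m := by
  induction m with
  | zero => omega
  | succ m ih =>
    by_cases hm0 : m = 0
    · subst hm0
      rw [pvChooseLen, pvChooseJ, if_pos (Or.inl rfl), if_neg (fun hc => absurd hc.1 (by omega))]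
    · have htm := htake (m + 1) (le_refl _)
      by_cases hmem : t.take (m + 1) ∈ polyList
      · rw [pvChooseLen, pvChooseJ, if_pos (Or.inr hmem), if_neg]
        rw [not_and, not_not]
        intro _
        rw [htm, PySem.Set.mem_ofList]
        exact hmem
      · rw [pvChooseLen, pvChooseJ, if_neg, if_pos]
        · exact ih (by omega) (fun j hj => htake j (by omega))
        · refine ⟨by omega, ?_⟩
          rw [htm, PySem.Set.mem_ofList]
          exact hmem
        · rw [not_or]
          exact ⟨by omega, hmem⟩

theorem pvChooseTop (polyList : List (List Char)) (t : List Char)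
    (hL : 2 ≤ t.length) (ht : t ∉ polyList) :
    pvChooseLen polyList t t.length = pvChooseLen polyList t (t.length - 1) := by
  obtain ⟨m, hm⟩ : ∃ m, t.length = m + 2 := ⟨t.length - 2, by omega⟩
  rw [hm]
  have htk : t.take (m + 2) = t := List.take_of_length_le (by omega)
  rw [pvChooseLen, if_neg]
  · norm_num
  · rw [not_or, htk]
    exact ⟨by omega, ht⟩

theorem pvFoldNoop (polyList : List (List Char)) (sepCs s : List Char) (i k : Nat) (out : List String)
    (m : Nat) (hik : i ≤ k) (hkm : k ≤ m) (hm : m ≤ s.length)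
    (hv : ∀ l, k ≤ l → l ≤ m → ¬(1 < (pvW s i l).length ∧ (polyList.any (fun g => PySem.Chars.startswith g (pvW s i l))) = false)) :
    (s.drop k).foldl (fun st c => pvDrain polyList sepCs (st.1 ++ [c]).length (st.1 ++ [c]) st.2) (pvW s i k, out)
    = (s.drop m).foldl (fun st c => pvDrain polyList sepCs (st.1 ++ [c]).length (st.1 ++ [c]) st.2) (pvW s i m, out) := by
  revert hm hv
  induction m, hkm using Nat.le_induction with
  | base => intro _ _; rfl
  | succ m hkm ih =>
    intro hm hv
    rw [ih (by omega) (fun l hl1 hl2 => hv l hl1 (by omega))]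
    have hmlt : m < s.length := by omega
    rw [List.drop_eq_getElem_cons hmlt, List.foldl_cons]
    show (s.drop (m+1)).foldl _ (pvDrain polyList sepCs (pvW s i m ++ [s[m]]).length (pvW s i m ++ [s[m]]) out) = _
    rw [pvW_append s i m (by omega) hmlt]
    rw [pvDrain_noop _ _ _ _ _ (hv (m + 1) (by omega) (le_refl _))]

theorem pvFireStep (polyList : List (List Char)) (sepCs s : List Char) (i K : Nat) (out : List String)
    (hik : i ≤ K) (hK : K ≤ s.length)
    (hD : 1 < (pvW s i K).length ∧ (polyList.any (fun g => PySem.Chars.startswith g (pvW s i K))) = false) :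
    pvDrain polyList sepCs (pvW s i K).length (pvW s i K) out
    = pvDrain polyList sepCs
        (pvW s (pvStrip sepCs s K (K - (i + pvChooseJ (PySem.Set.ofList polyList) s i (K - i - 1)))
          (i + pvChooseJ (PySem.Set.ofList polyList) s i (K - i - 1))) K).length
        (pvW s (pvStrip sepCs s K (K - (i + pvChooseJ (PySem.Set.ofList polyList) s i (K - i - 1)))
          (i + pvChooseJ (PySem.Set.ofList polyList) s i (K - i - 1))) K)
        (out ++ [String.ofList ((s.drop i).take (pvChooseJ (PySem.Set.ofList polyList) s i (K - i - 1)))]) := by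
  have hlen : (pvW s i K).length = K - i := pvW_len s i K hK
  have hKi : 2 ≤ K - i := by omega
  have hj := pvChooseJ_bounds (PySem.Set.ofList polyList) s i (K - i - 1) (by omega)
  have hnotmem : pvW s i K ∉ polyList := by
    intro hmem
    have hex : ∃ g ∈ polyList, pvW s i K <+: g := ⟨_, hmem, List.prefix_refl _⟩
    rw [← pvAnyPrefix] at hex
    rw [hD.2] at hex
    exact absurd hex (by simp)
  have hchoose : pvChooseLen polyList (pvW s i K) (pvW s i K).length
      = pvChooseJ (PySem.Set.ofList polyList) s i (K - i - 1) := by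
    calc pvChooseLen polyList (pvW s i K) (pvW s i K).length
        = pvChooseLen polyList (pvW s i K) ((pvW s i K).length - 1) :=
          pvChooseTop polyList (pvW s i K) (by omega) hnotmem
      _ = pvChooseJ (PySem.Set.ofList polyList) s i ((pvW s i K).length - 1) :=
          pvChooseEq polyList s i (pvW s i K) ((pvW s i K).length - 1) (by omega)
            (fun j hj => (pvW_take s i K j (by omega)).symm)
      _ = pvChooseJ (PySem.Set.ofList polyList) s i (K - i - 1) := by rw [hlen]
  obtain ⟨m, hm⟩ : ∃ m, (pvW s i K).length = m + 1 := ⟨(pvW s i K).length - 1, by omega⟩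
  rw [hm, pvDrain_fire polyList sepCs m _ _ (by omega) hD, hchoose]
  have hstrip : ((pvW s i K).drop (pvChooseJ (PySem.Set.ofList polyList) s i (K - i - 1))).dropWhile (fun c => c ∈ sepCs)
      = pvW s (pvStrip sepCs s K (K - (i + pvChooseJ (PySem.Set.ofList polyList) s i (K - i - 1)))
          (i + pvChooseJ (PySem.Set.ofList polyList) s i (K - i - 1))) K := by
    rw [pvW_drop]
    exact pvStripEq sepCs s K _ (i + pvChooseJ (PySem.Set.ofList polyList) s i (K - i - 1))
      (by omega) hK (le_refl _)
  rw [hstrip, pvW_take s i K (pvChooseJ (PySem.Set.ofList polyList) s i (K - i - 1)) (by omega)]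

theorem pvMain (polyList : List (List Char)) (sepCs s : List Char) (fuel : Nat) :
    ∀ (i k : Nat) (out : List String), i ≤ k → k ≤ s.length → s.length - i < fuel →
    pvScan (PySem.Set.ofList polyList) (PySem.Set.ofList (pvPrefList polyList)) sepCs s s.length fuel i k out
    = ((s.drop k).foldl (fun st c => pvDrain polyList sepCs (st.1 ++ [c]).length (st.1 ++ [c]) st.2)
        (pvDrain polyList sepCs (pvW s i k).length (pvW s i k) out)).2 := by
  induction fuel with
  | zero => intro i k out _ _ hf; omega
  | succ fuel ih =>
    intro i k out hik hk hf
    have hbridge : ∀ l, i ≤ l → l ≤ s.length →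
        ((l - i < 2 ∨ (s.drop i).take (l - i) ∈ PySem.Set.ofList (pvPrefList polyList)) ↔
          ¬(1 < (pvW s i l).length ∧ (polyList.any (fun g => PySem.Chars.startswith g (pvW s i l))) = false)) := by
      intro l hil hl
      have hlen := pvW_len s i l hl
      have hWeq : (s.drop i).take (l - i) = pvW s i l := rfl
      rw [hWeq, PySem.Set.mem_ofList, pvMemPref]
      constructor
      · rintro (h2 | ⟨hne, hex⟩) hD
        · omega
        · rw [← pvAnyPrefix] at hex
          rw [hD.2] at hex
          exact absurd hex (by simp)
      · intro hnd
        by_cases h2 : l - i < 2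
        · exact Or.inl h2
        · right
          have h1l : 1 < (pvW s i l).length := by omega
          have hany : (polyList.any (fun g => PySem.Chars.startswith g (pvW s i l))) = true := by
            by_contra hfa
            exact hnd ⟨h1l, by simpa using hfa⟩
          refine ⟨?_, (pvAnyPrefix _ _).mp hany⟩
          intro hnil
          rw [hnil] at hlen
          simp at hlen
          omega
    have hge := pvGrow_ge (PySem.Set.ofList (pvPrefList polyList)) s s.length i (s.length + 1 - k) k
    have hexit := pvGrow_exit (PySem.Set.ofList (pvPrefList polyList)) s s.length i (s.length + 1 - k) k (le_refl _)
    by_cases hKn : s.length < pvGrow (PySem.Set.ofList (pvPrefList polyList)) s s.length i (s.length + 1 - k) k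
    · -- all remaining characters keep the window viable: both sides return `out`
      rw [pvScan]
      simp only [if_pos hKn]
      have hvk := pvGrow_below (PySem.Set.ofList (pvPrefList polyList)) s s.length i (s.length + 1 - k) k k (le_refl _) (by omega)
      rw [pvDrain_noop _ _ _ _ _ ((hbridge k hik hk).mp hvk.2)]
      rw [pvFoldNoop polyList sepCs s i k out s.length hik hk (le_refl _)
        (fun l hl1 hl2 => (hbridge l (by omega) hl2).mp
          (pvGrow_below (PySem.Set.ofList (pvPrefList polyList)) s s.length i (s.length + 1 - k) k l hl1 (by omega)).2)]
      rw [List.drop_length]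
      rfl
    · rw [not_lt] at hKn
      have hcond : ¬(pvGrow (PySem.Set.ofList (pvPrefList polyList)) s s.length i (s.length + 1 - k) k - i < 2 ∨
          (s.drop i).take (pvGrow (PySem.Set.ofList (pvPrefList polyList)) s s.length i (s.length + 1 - k) k - i) ∈
            PySem.Set.ofList (pvPrefList polyList)) := fun hc => hexit ⟨hKn, hc⟩
      have hiK : i ≤ pvGrow (PySem.Set.ofList (pvPrefList polyList)) s s.length i (s.length + 1 - k) k := le_trans hik hge
      have hD : 1 < (pvW s i (pvGrow (PySem.Set.ofList (pvPrefList polyList)) s s.length i (s.length + 1 - k) k)).length ∧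
          (polyList.any (fun g => PySem.Chars.startswith g
            (pvW s i (pvGrow (PySem.Set.ofList (pvPrefList polyList)) s s.length i (s.length + 1 - k) k)))) = false := by
        by_contra hnd
        exact hcond ((hbridge _ hiK hKn).mpr hnd)
      have hlenW := pvW_len s i (pvGrow (PySem.Set.ofList (pvPrefList polyList)) s s.length i (s.length + 1 - k) k) hKn
      have hKi : 2 ≤ pvGrow (PySem.Set.ofList (pvPrefList polyList)) s s.length i (s.length + 1 - k) k - i := by omega
      have hj := pvChooseJ_bounds (PySem.Set.ofList polyList) s i
        (pvGrow (PySem.Set.ofList (pvPrefList polyList)) s s.length i (s.length + 1 - k) k - i - 1) (by omega)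
      have hs := pvStrip_bounds sepCs s (pvGrow (PySem.Set.ofList (pvPrefList polyList)) s s.length i (s.length + 1 - k) k)
        (pvGrow (PySem.Set.ofList (pvPrefList polyList)) s s.length i (s.length + 1 - k) k
          - (i + pvChooseJ (PySem.Set.ofList polyList) s i
              (pvGrow (PySem.Set.ofList (pvPrefList polyList)) s s.length i (s.length + 1 - k) k - i - 1)))
        (i + pvChooseJ (PySem.Set.ofList polyList) s i
          (pvGrow (PySem.Set.ofList (pvPrefList polyList)) s s.length i (s.length + 1 - k) k - i - 1)) (by omega)
      -- unfold one iteration of the scan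
      rw [pvScan]
      simp only [if_neg (by omega : ¬ s.length < pvGrow (PySem.Set.ofList (pvPrefList polyList)) s s.length i (s.length + 1 - k) k)]
      -- rewrite the A side up to the firing point
      have hfoldK : ((s.drop k).foldl (fun st c => pvDrain polyList sepCs (st.1 ++ [c]).length (st.1 ++ [c]) st.2)
            (pvDrain polyList sepCs (pvW s i k).length (pvW s i k) out)).2
          = ((s.drop (pvGrow (PySem.Set.ofList (pvPrefList polyList)) s s.length i (s.length + 1 - k) k)).foldl
              (fun st c => pvDrain polyList sepCs (st.1 ++ [c]).length (st.1 ++ [c]) st.2)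
              (pvDrain polyList sepCs
                (pvW s i (pvGrow (PySem.Set.ofList (pvPrefList polyList)) s s.length i (s.length + 1 - k) k)).length
                (pvW s i (pvGrow (PySem.Set.ofList (pvPrefList polyList)) s s.length i (s.length + 1 - k) k)) out)).2 := by
        rcases Nat.eq_or_lt_of_le hge with he | hlt
        · rw [← he]
        · have hvk := pvGrow_below (PySem.Set.ofList (pvPrefList polyList)) s s.length i (s.length + 1 - k) k k (le_refl _) (by omega)
          rw [pvDrain_noop _ _ _ _ _ ((hbridge k hik hk).mp hvk.2)]
          rw [pvFoldNoop polyList sepCs s i k out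
            (pvGrow (PySem.Set.ofList (pvPrefList polyList)) s s.length i (s.length + 1 - k) k - 1) hik (by omega) (by omega)
            (fun l hl1 hl2 => (hbridge l (by omega) (by omega)).mp
              (pvGrow_below (PySem.Set.ofList (pvPrefList polyList)) s s.length i (s.length + 1 - k) k l hl1 (by omega)).2)]
          have hm1 : pvGrow (PySem.Set.ofList (pvPrefList polyList)) s s.length i (s.length + 1 - k) k - 1 < s.length := by omega
          rw [List.drop_eq_getElem_cons hm1, List.foldl_cons]
          show ((s.drop (pvGrow (PySem.Set.ofList (pvPrefList polyList)) s s.length i (s.length + 1 - k) k - 1 + 1)).foldl _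
            (pvDrain polyList sepCs
              (pvW s i (pvGrow (PySem.Set.ofList (pvPrefList polyList)) s s.length i (s.length + 1 - k) k - 1)
                ++ [s[pvGrow (PySem.Set.ofList (pvPrefList polyList)) s s.length i (s.length + 1 - k) k - 1]]).length
              (pvW s i (pvGrow (PySem.Set.ofList (pvPrefList polyList)) s s.length i (s.length + 1 - k) k - 1)
                ++ [s[pvGrow (PySem.Set.ofList (pvPrefList polyList)) s s.length i (s.length + 1 - k) k - 1]]) out)).2 = _
          rw [pvW_append s i _ (by omega) hm1]
          have he1 : pvGrow (PySem.Set.ofList (pvPrefList polyList)) s s.length i (s.length + 1 - k) k - 1 + 1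
              = pvGrow (PySem.Set.ofList (pvPrefList polyList)) s s.length i (s.length + 1 - k) k := by omega
          rw [he1]
      rw [hfoldK]
      rw [pvFireStep polyList sepCs s i _ out hiK hKn hD]
      exact ih
        (pvStrip sepCs s (pvGrow (PySem.Set.ofList (pvPrefList polyList)) s s.length i (s.length + 1 - k) k)
          (pvGrow (PySem.Set.ofList (pvPrefList polyList)) s s.length i (s.length + 1 - k) k
            - (i + pvChooseJ (PySem.Set.ofList polyList) s i
                (pvGrow (PySem.Set.ofList (pvPrefList polyList)) s s.length i (s.length + 1 - k) k - i - 1)))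
          (i + pvChooseJ (PySem.Set.ofList polyList) s i
            (pvGrow (PySem.Set.ofList (pvPrefList polyList)) s s.length i (s.length + 1 - k) k - i - 1)))
        (pvGrow (PySem.Set.ofList (pvPrefList polyList)) s s.length i (s.length + 1 - k) k)
        (out ++ [String.ofList ((s.drop i).take (pvChooseJ (PySem.Set.ofList polyList) s i
          (pvGrow (PySem.Set.ofList (pvPrefList polyList)) s s.length i (s.length + 1 - k) k - i - 1)))])
        (by omega) hKn (by omega)

-- ===== VERDICT (by name: the statement is the Claim_ definition above) =====
theorem parse_word_spec : Claim_equal_parse_word := by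
  unfold Claim_equal_parse_word
  intro word graphs _ hpre
  unfold Spec_parse_word
  cases graphs with
  | none => rfl
  | some gs =>
    cases hg : PySem.List.pyGet? gs 0 with
    | none => simp only [parse_word, parse_word_alt, hg]
    | some separator =>
      simp only [parse_word, parse_word_alt, hg]
      rw [show (List.flatMap (fun g => List.map (fun l => List.take (l + 1) g) (List.range g.length))
            (List.map String.toList (List.filter (fun g => decide (1 < g.toList.length)) gs)))
          = pvPrefList (List.map String.toList (List.filter (fun g => decide (1 < g.toList.length)) gs)) from rfl]
      rw [pvMain ((gs.filter (fun g => 1 < g.toList.length)).map String.toList) separator.toList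
        (pvNorm word separator) ((pvNorm word separator).length + 1) 0 0 [] (le_refl 0) (Nat.zero_le _) (by omega)]
      rw [show pvW (pvNorm word separator) 0 0 = [] from rfl]
      rw [pvDrain_noop _ _ _ _ _ (by simp)]
      rw [List.drop_zero]
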